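-- pv_equiv track=rewrite | github.com/rafico/br_hw | evaluate.py | _labels_for_items
-- ===== SOURCE A (Python) =====
-- from typing import Dict, Iterable, List, Optional, Tuple
--
-- def _labels_for_items(gt_frames: Dict[int, set], pred_frames: Dict[int, set]) -> Tuple[list, list]:
--     universe = sorted(set().union(*gt_frames.values(), *pred_frames.values()) if (gt_frames or pred_frames) else [])
--     gt_lookup = {}
--     pred_lookup = {}
--     for gt_id, frames in gt_frames.items():
--         for item in frames:
--             gt_lookup[item] = gt_id
--     for pred_id, frames in pred_frames.items():
--         for item in frames:
--             pred_lookup[item] = pred_id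
--
--     gt_labels = [gt_lookup.get(item, -1) for item in universe]
--     pred_labels = [pred_lookup.get(item, -1) for item in universe]
--     return gt_labels, pred_labels
-- ===== SOURCE B (Python) =====
-- def _labels_for_items(gt_frames, pred_frames):
--     # Tag every (cluster, item) membership as a record, sort the records
--     # lexicographically, and emit both label rows in one grouping sweep.
--     records = []
--     seq = 0
--     for src, frames_dict in ((0, gt_frames), (1, pred_frames)):
--         for cid, frames in frames_dict.items():
--             for item in frames:
--                 records.append((item, src, seq, cid))
--             seq += 1
--     records.sort()
--     gt_labels, pred_labels = [], []
--     i, n = 0, len(records)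
--     while i < n:
--         item = records[i][0]
--         g = p = -1
--         while i < n and records[i][0] == item:
--             _, src, _, cid = records[i]
--             if src == 0:
--                 g = cid
--             else:
--                 p = cid
--             i += 1
--         gt_labels.append(g)
--         pred_labels.append(p)
--     return gt_labels, pred_labels
-- ===== Notes on version B (the rewrite author's own statement) =====
-- stated objective: alternative
-- what changed: Instead of A's set-union + sort of the item universe plus two item->id lookup dicts read back per universe item, B tags every (cluster, item) membership as an (item, src, seq, id) record, sorts the records once lexicographically, and emits both label rows in a single grouping sweep over the sorted records, with no sets or dicts at all.
import Mathlib
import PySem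

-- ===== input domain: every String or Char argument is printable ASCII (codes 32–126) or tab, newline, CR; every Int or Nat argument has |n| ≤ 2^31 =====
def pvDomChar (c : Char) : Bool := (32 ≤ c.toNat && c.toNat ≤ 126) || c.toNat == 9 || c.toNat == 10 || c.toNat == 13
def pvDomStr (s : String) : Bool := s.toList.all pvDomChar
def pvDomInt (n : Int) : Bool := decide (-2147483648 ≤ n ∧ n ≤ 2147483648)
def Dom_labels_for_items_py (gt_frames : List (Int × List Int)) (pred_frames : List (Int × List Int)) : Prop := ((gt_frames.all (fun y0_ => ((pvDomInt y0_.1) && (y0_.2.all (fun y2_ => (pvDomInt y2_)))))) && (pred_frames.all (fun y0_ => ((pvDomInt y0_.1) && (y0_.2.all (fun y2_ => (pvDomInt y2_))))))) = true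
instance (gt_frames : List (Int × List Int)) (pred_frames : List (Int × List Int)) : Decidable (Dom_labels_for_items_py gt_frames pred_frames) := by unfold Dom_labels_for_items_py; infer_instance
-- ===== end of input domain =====

-- B replaces A's set-union + sort + two lookup dicts by a different algorithm: it tags every
-- (cluster, item) membership as a (item, src, seq, id) record, sorts the records once
-- lexicographically, and emits both label rows in a single grouping sweep; alternative, same cost.

-- ===== PORT A =====
-- universe = sorted(set().union(*gt.values(), *pred.values()) if (gt or pred) else [])
def pvUniverse (gt_frames : List (Int × List Int)) (pred_frames : List (Int × List Int)) : List Int :=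
  PySem.List.sorted
    (if gt_frames = [] ∧ pred_frames = [] then []
     else PySem.Set.ofList ((gt_frames.map Prod.snd).flatten ++ (pred_frames.map Prod.snd).flatten))
    (fun x => x) false

-- the two nested 'for' loops building gt_lookup / pred_lookup
def pvLookup (frames : List (Int × List Int)) (d : PySem.Dict Int Int) : PySem.Dict Int Int :=
  frames.foldl (fun d p => p.2.foldl (fun d it => d.insert it p.1) d) d

def labels_for_items_py (gt_frames : List (Int × List Int)) (pred_frames : List (Int × List Int)) : List Int × List Int :=
  let univ := pvUniverse gt_frames pred_frames
  let gt_lookup := pvLookup gt_frames PySem.Dict.empty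
  let pred_lookup := pvLookup pred_frames PySem.Dict.empty
  (univ.map (fun item => gt_lookup.getD item (-1)),
   univ.map (fun item => pred_lookup.getD item (-1)))

-- ===== PORT B =====
-- the record-building loop: 'for cid, frames in fd.items(): for item in frames: records.append(…)'
-- with the running counter seq; state = (records so far, seq)
def pvAddFrames (src : Int) (st : List (Int × Int × Int × Int) × Int)
    (fd : List (Int × List Int)) : List (Int × Int × Int × Int) × Int :=
  fd.foldl (fun st p => (p.2.foldl (fun acc it => acc ++ [(it, src, st.2, p.1)]) st.1, st.2 + 1)) st

def pvRecords (gt_frames : List (Int × List Int)) (pred_frames : List (Int × List Int)) :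
    List (Int × Int × Int × Int) :=
  (pvAddFrames 1 (pvAddFrames 0 ([], 0) gt_frames) pred_frames).1

-- records.sort(): Python's list sort = stable sort by lexicographic tuple comparison
def pvLexLe (r s : Int × Int × Int × Int) : Bool :=
  decide (r.1 < s.1) || (decide (r.1 = s.1) &&
    (decide (r.2.1 < s.2.1) || (decide (r.2.1 = s.2.1) &&
      (decide (r.2.2.1 < s.2.2.1) || (decide (r.2.2.1 = s.2.2.1) && decide (r.2.2.2 ≤ s.2.2.2))))))

-- the inner 'while i < n and records[i][0] == item' loop: consume one item group,
-- updating g/p, returning the remaining records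
def pvGrp (x g p : Int) : List (Int × Int × Int × Int) → Int × Int × List (Int × Int × Int × Int)
  | [] => (g, p, [])
  | r :: rest =>
    if r.1 == x then
      pvGrp x (if r.2.1 == 0 then r.2.2.2 else g) (if r.2.1 == 0 then p else r.2.2.2) rest
    else (g, p, r :: rest)

theorem pvGrp_length_le (x g p : Int) (l : List (Int × Int × Int × Int)) :
    (pvGrp x g p l).2.2.length ≤ l.length := by
  induction l generalizing g p with
  | nil => simp [pvGrp]
  | cons r rest ih =>
      simp only [pvGrp]
      split
      · exact Nat.le_succ_of_le (ih _ _)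
      · simp

-- the outer 'while i < n' loop (the first record of each group is consumed by the first
-- inner-loop iteration; here its update is unrolled before pvGrp handles the rest)
def pvSweep : List (Int × Int × Int × Int) → List Int × List Int
  | [] => ([], [])
  | r :: rest =>
    let t := pvGrp r.1 (if r.2.1 == 0 then r.2.2.2 else -1) (if r.2.1 == 0 then -1 else r.2.2.2) rest
    let tl := pvSweep t.2.2
    (t.1 :: tl.1, t.2.1 :: tl.2)
termination_by l => l.length
decreasing_by exact Nat.lt_succ_of_le (pvGrp_length_le _ _ _ _)

def labels_for_items_py_alt (gt_frames : List (Int × List Int)) (pred_frames : List (Int × List Int)) : List Int × List Int :=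
  pvSweep ((pvRecords gt_frames pred_frames).mergeSort pvLexLe)

-- ===== PRECONDITION & SPEC =====
def Spec_labels_for_items_py (gt_frames : List (Int × List Int)) (pred_frames : List (Int × List Int)) (out : List Int × List Int) : Prop := out = labels_for_items_py_alt gt_frames pred_frames
instance (gt_frames : List (Int × List Int)) (pred_frames : List (Int × List Int)) (out : List Int × List Int) : Decidable (Spec_labels_for_items_py gt_frames pred_frames out) := by unfold Spec_labels_for_items_py; infer_instance

-- ===== CLAIM (what is proved, stated in full; the proofs are below) =====
def Claim_equal_labels_for_items_py : Prop := ∀ (gt_frames : List (Int × List Int)) (pred_frames : List (Int × List Int)), Dom_labels_for_items_py gt_frames pred_frames → Spec_labels_for_items_py gt_frames pred_frames (labels_for_items_py gt_frames pred_frames)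

-- ===== LEMMAS AND PROOFS =====

-- record fields: item r.1, src r.2.1, seq r.2.2.1, cid r.2.2.2
def pvCid (r : Int × Int × Int × Int) : Int := r.2.2.2

-- the records one frames dict contributes, starting at seq s
def enumF (sb : Int) (fd : List (Int × List Int)) (s : Int) : List (Int × Int × Int × Int) :=
  (PySem.List.enumerate fd s).flatMap (fun jp => jp.2.2.map (fun it => (it, sb, jp.1, jp.2.1)))

-- group filters: the gt / pred records of item x
def gKey (x : Int) (r : Int × Int × Int × Int) : Bool := r.1 == x && r.2.1 == 0
def pKey (x : Int) (r : Int × Int × Int × Int) : Bool := r.1 == x && !(r.2.1 == 0)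

-- the label a filtered record list yields: cid of its last record, default -1
def lastLab (l : List (Int × Int × Int × Int)) (px : (Int × Int × Int × Int) → Bool) : Int :=
  ((l.filter px).map pvCid).getLast?.getD (-1)

-- distinct items of a sorted record list, in order
def pvDI : List (Int × Int × Int × Int) → List Int
  | [] => []
  | r :: rest => r.1 :: pvDI (rest.dropWhile (fun s => s.1 == r.1))
termination_by l => l.length
decreasing_by exact Nat.lt_succ_of_le (List.length_dropWhile_le _ _)

theorem lastD_cons (a : Int) (l : List Int) (d : Int) :
    (a :: l).getLast?.getD d = l.getLast?.getD a := by
  rw [List.getLast?_cons]; rfl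

theorem lastD_append (A B : List Int) (v : Int) :
    (A ++ B).getLast?.getD v = B.getLast?.getD (A.getLast?.getD v) := by
  rw [List.getLast?_append]; cases B.getLast? <;> rfl

theorem pvAddFrames_spec (fd : List (Int × List Int)) (src : Int)
    (st : List (Int × Int × Int × Int) × Int) :
    pvAddFrames src st fd = (st.1 ++ enumF src fd st.2, st.2 + fd.length) := by
  induction fd generalizing st with
  | nil => simp [pvAddFrames, enumF, PySem.List.enumerate]
  | cons p t ih =>
      simp only [pvAddFrames, List.foldl_cons] at *
      rw [PySem.List.foldl_append_singleton_eq_map]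
      rw [ih]
      simp only [enumF, PySem.List.enumerate_cons, List.flatMap_cons, List.append_assoc,
        Prod.mk.injEq]
      refine ⟨trivial, ?_⟩
      push_cast [List.length_cons]; ring

theorem pvRecords_eq (gt pred : List (Int × List Int)) :
    pvRecords gt pred = enumF 0 gt 0 ++ enumF 1 pred gt.length := by
  unfold pvRecords
  rw [pvAddFrames_spec, pvAddFrames_spec]
  simp

theorem mem_enumF {sb : Int} {fd : List (Int × List Int)} {s : Int}
    {r : Int × Int × Int × Int} (h : r ∈ enumF sb fd s) :
    r.2.1 = sb ∧ ∃ jp ∈ PySem.List.enumerate fd s, r.2.2.1 = jp.1 ∧ r.2.2.2 = jp.2.1 ∧ r.1 ∈ jp.2.2 := by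
  simp only [enumF, List.mem_flatMap, List.mem_map] at h
  obtain ⟨jp, hjp, it, hit, rfl⟩ := h
  exact ⟨rfl, jp, hjp, rfl, rfl, hit⟩

theorem enumF_map_item (sb : Int) (fd : List (Int × List Int)) (s : Int) :
    (enumF sb fd s).map (fun r => r.1) = (fd.map Prod.snd).flatten := by
  induction fd generalizing s with
  | nil => simp [enumF, PySem.List.enumerate]
  | cons p t ih =>
      simp only [enumF, PySem.List.enumerate_cons, List.flatMap_cons, List.map_append,
        List.map_map, List.map_cons, List.flatten_cons] at *
      rw [ih]
      refine congrArg (· ++ _) ?_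
      exact List.map_congr_left (fun a _ => rfl) |>.trans (List.map_id _)

theorem records_map_item (gt pred : List (Int × List Int)) :
    (pvRecords gt pred).map (fun r => r.1)
      = (gt.map Prod.snd).flatten ++ (pred.map Prod.snd).flatten := by
  rw [pvRecords_eq, List.map_append, enumF_map_item, enumF_map_item]

-- ---- the sweep: group characterization ----

theorem optGetD_map (o : Option (Int × Int × Int × Int)) (r : Int × Int × Int × Int) :
    (o.map pvCid).getD r.2.2.2 = pvCid (o.getD r) := by cases o <;> rfl

theorem pvGrp_spec (l : List (Int × Int × Int × Int)) (x g p : Int) :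
    pvGrp x g p l =
      ( (((l.takeWhile (fun s => s.1 == x)).filter (fun r => r.2.1 == 0)).map pvCid).getLast?.getD g,
        (((l.takeWhile (fun s => s.1 == x)).filter (fun r => !(r.2.1 == 0))).map pvCid).getLast?.getD p,
        l.dropWhile (fun s => s.1 == x) ) := by
  induction l generalizing g p with
  | nil => simp [pvGrp]
  | cons r rest ih =>
      simp only [pvGrp]
      by_cases hr : (r.1 == x) = true
      · rw [if_pos hr, ih]
        simp only [List.takeWhile_cons, List.dropWhile_cons, hr, if_true, List.filter_cons]
        by_cases hs : (r.2.1 == 0) = true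
        · simp [hs, lastD_cons, optGetD_map]
        · simp [hs, lastD_cons, optGetD_map]
      · rw [if_neg hr]
        simp [hr]

-- ---- sorted lists: items after the first group are different ----

theorem dropWhile_item_ne (t : List (Int × Int × Int × Int)) (x : Int)
    (hge : ∀ s ∈ t, x ≤ s.1) (hp : t.Pairwise (fun a b => a.1 ≤ b.1)) :
    ∀ s ∈ t.dropWhile (fun a => a.1 == x), s.1 ≠ x := by
  induction t with
  | nil => simp
  | cons a t ih =>
      rw [List.dropWhile_cons]
      by_cases ha : (a.1 == x) = true
      · rw [if_pos ha]
        exact ih (fun s hs => hge s (List.mem_cons_of_mem _ hs)) (List.pairwise_cons.mp hp).2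
      · rw [if_neg ha]
        intro s hs
        rcases List.mem_cons.mp hs with rfl | hs'
        · exact fun he => ha (by simp [he])
        · have h1 : x ≤ a.1 := hge a List.mem_cons_self
          have h2 : a.1 ≠ x := fun he => ha (by simp [he])
          have h3 : a.1 ≤ s.1 := (List.pairwise_cons.mp hp).1 s hs'
          omega

theorem pvDI_subset : ∀ (l : List (Int × Int × Int × Int)) (x : Int),
    x ∈ pvDI l → ∃ s ∈ l, s.1 = x := by
  intro l
  induction l using pvDI.induct with
  | case1 => simp [pvDI]
  | case2 r rest ih =>
      intro x hx
      rw [pvDI] at hx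
      rcases List.mem_cons.mp hx with rfl | hx'
      · exact ⟨r, List.mem_cons_self, rfl⟩
      · obtain ⟨s, hs, rfl⟩ := ih x hx'
        exact ⟨s, List.mem_cons_of_mem _ ((List.dropWhile_sublist _).mem hs), rfl⟩

theorem pvDI_mem : ∀ (l : List (Int × Int × Int × Int)) (s : Int × Int × Int × Int),
    s ∈ l → s.1 ∈ pvDI l := by
  intro l
  induction l using pvDI.induct with
  | case1 => simp
  | case2 r rest ih =>
      intro s hs
      rw [pvDI]
      rcases List.mem_cons.mp hs with rfl | hs'
      · exact List.mem_cons_self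
      · rw [← List.takeWhile_append_dropWhile (p := fun a => a.1 == r.1) (l := rest)] at hs'
        rcases List.mem_append.mp hs' with h | h
        · have : (s.1 == r.1) = true :=
            List.mem_takeWhile_imp (p := fun a : Int × Int × Int × Int => a.1 == r.1) h
          rw [List.mem_cons]
          left
          exact (beq_iff_eq.mp this)
        · exact List.mem_cons_of_mem _ (ih s h)

theorem pvDI_pairwise : ∀ (l : List (Int × Int × Int × Int)),
    l.Pairwise (fun a b => a.1 ≤ b.1) → (pvDI l).Pairwise (· < ·) := by
  intro l
  induction l using pvDI.induct with
  | case1 => simp [pvDI]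
  | case2 r rest ih =>
      intro hp
      rw [pvDI]
      have htail := (List.pairwise_cons.mp hp).2
      have hge : ∀ s ∈ rest, r.1 ≤ s.1 := (List.pairwise_cons.mp hp).1
      refine List.pairwise_cons.mpr ⟨?_, ih (List.Pairwise.sublist (List.dropWhile_sublist _) htail)⟩
      intro y hy
      obtain ⟨s, hs, rfl⟩ := pvDI_subset _ y hy
      have h1 : s.1 ≠ r.1 := dropWhile_item_ne rest r.1 hge htail s hs
      have h2 : r.1 ≤ s.1 := hge s ((List.dropWhile_sublist _).mem hs)
      omega

-- ---- the sweep equals "distinct items, each labelled by its last record" ----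

theorem pvSweep_spec : ∀ (n : Nat) (l : List (Int × Int × Int × Int)), l.length ≤ n →
    l.Pairwise (fun a b => a.1 ≤ b.1) →
    pvSweep l = ((pvDI l).map (fun x => lastLab l (gKey x)), (pvDI l).map (fun x => lastLab l (pKey x))) := by
  intro n
  induction n with
  | zero =>
      intro l hl _
      rw [List.length_eq_zero_iff.mp (Nat.le_zero.mp hl)]
      simp [pvSweep, pvDI]
  | succ n ih =>
      intro l hl hp
      match l with
      | [] => simp [pvSweep, pvDI]
      | r :: rest =>
        rw [pvSweep, pvGrp_spec]
        have hge : ∀ s ∈ rest, r.1 ≤ s.1 := (List.pairwise_cons.mp hp).1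
        have htail := (List.pairwise_cons.mp hp).2
        have hne := dropWhile_item_ne rest r.1 hge htail
        have hlen : (rest.dropWhile (fun s => s.1 == r.1)).length ≤ n := by
          have := List.length_dropWhile_le (fun s : Int × Int × Int × Int => s.1 == r.1) rest
          simp only [List.length_cons] at hl
          omega
        rw [ih _ hlen (List.Pairwise.sublist (List.dropWhile_sublist _) htail)]
        rw [pvDI]
        simp only [List.map_cons, Prod.mk.injEq]
        -- the filtered whole list seen through takeWhile/dropWhile
        have hsplit : ∀ (px : (Int × Int × Int × Int) → Bool),
            (r :: rest).filter px
              = (r :: rest.takeWhile (fun s => s.1 == r.1)).filter px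
                ++ (rest.dropWhile (fun s => s.1 == r.1)).filter px := by
          intro px
          conv_lhs => rw [← List.takeWhile_append_dropWhile (p := fun s => s.1 == r.1) (l := rest)]
          rw [← List.cons_append, List.filter_append]
        have hhd : ∀ (q : (Int × Int × Int × Int) → Bool),
            lastLab (r :: rest) (fun s => s.1 == r.1 && q s)
              = (((r :: rest.takeWhile (fun s => s.1 == r.1)).filter q).map pvCid).getLast?.getD (-1) := by
          intro q
          unfold lastLab
          rw [hsplit]
          have hnil : (rest.dropWhile (fun s => s.1 == r.1)).filter (fun s => s.1 == r.1 && q s) = [] := by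
            rw [List.filter_eq_nil_iff]
            intro a ha
            simp only [Bool.and_eq_true, beq_iff_eq, not_and]
            intro he
            exact absurd he (hne a ha)
          rw [hnil, List.append_nil]
          have hfc : ∀ a ∈ (r :: rest.takeWhile (fun s => s.1 == r.1)),
              ((fun s : Int × Int × Int × Int => s.1 == r.1 && q s) a) = q a := by
            intro a ha
            have : (a.1 == r.1) = true := by
              rcases List.mem_cons.mp ha with rfl | h
              · simp
              · exact List.mem_takeWhile_imp (p := fun a : Int × Int × Int × Int => a.1 == r.1) h
            simp [this]
          rw [List.filter_congr hfc]
        have htl : ∀ y, y ∈ pvDI (rest.dropWhile (fun s => s.1 == r.1)) →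
            ∀ (q : (Int × Int × Int × Int) → Bool),
            lastLab (rest.dropWhile (fun s => s.1 == r.1)) (fun s => s.1 == y && q s)
              = lastLab (r :: rest) (fun s => s.1 == y && q s) := by
          intro y hy q
          obtain ⟨s, hs, rfl⟩ := pvDI_subset _ y hy
          have hyne : s.1 ≠ r.1 := hne s hs
          unfold lastLab
          rw [hsplit]
          have hnil : (r :: rest.takeWhile (fun a => a.1 == r.1)).filter (fun a => a.1 == s.1 && q a) = [] := by
            rw [List.filter_eq_nil_iff]
            intro a ha
            have : (a.1 == r.1) = true := by
              rcases List.mem_cons.mp ha with rfl | h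
              · simp
              · exact List.mem_takeWhile_imp (p := fun a : Int × Int × Int × Int => a.1 == r.1) h
            simp only [Bool.and_eq_true, beq_iff_eq, not_and]
            intro he
            exact absurd (by rw [← he]; exact beq_iff_eq.mp this) hyne
          rw [hnil, List.nil_append]
        have hg : ∀ y, gKey y = (fun s : Int × Int × Int × Int => s.1 == y && s.2.1 == 0) :=
          fun _ => rfl
        have hq : ∀ y, pKey y = (fun s : Int × Int × Int × Int => s.1 == y && !(s.2.1 == 0)) :=
          fun _ => rfl
        refine ⟨?_, ?_⟩
        · congr 1
          · -- head gt label
            rw [hg r.1, hhd (fun s => s.2.1 == 0)]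
            by_cases hs : (r.2.1 == 0) = true
            · rw [List.filter_cons_of_pos (p := fun s : Int × Int × Int × Int => s.2.1 == 0) hs,
                List.map_cons, lastD_cons, if_pos hs]
              rfl
            · rw [List.filter_cons_of_neg (p := fun s : Int × Int × Int × Int => s.2.1 == 0) hs,
                if_neg hs]
          · refine (List.map_congr_left (fun y hy => ?_)).symm
            rw [hg y, htl y hy (fun s => s.2.1 == 0)]
        · congr 1
          · rw [hq r.1, hhd (fun s => !(s.2.1 == 0))]
            by_cases hs : (r.2.1 == 0) = true
            · rw [List.filter_cons_of_neg (p := fun s : Int × Int × Int × Int => !(s.2.1 == 0))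
                (by simp [hs]), if_pos hs]
            · rw [List.filter_cons_of_pos (p := fun s : Int × Int × Int × Int => !(s.2.1 == 0))
                (by simp [hs]), List.map_cons, lastD_cons, if_neg hs]
              rfl
          · refine (List.map_congr_left (fun y hy => ?_)).symm
            rw [hq y, htl y hy (fun s => !(s.2.1 == 0))]

-- ---- order facts about the record comparison ----

theorem pvLexLe_trans (a b c : Int × Int × Int × Int)
    (h1 : pvLexLe a b = true) (h2 : pvLexLe b c = true) : pvLexLe a c = true := by
  obtain ⟨a1, a2, a3, a4⟩ := a; obtain ⟨b1, b2, b3, b4⟩ := b; obtain ⟨c1, c2, c3, c4⟩ := c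
  simp only [pvLexLe, Bool.or_eq_true, Bool.and_eq_true, decide_eq_true_eq] at *
  omega

theorem pvLexLe_total (a b : Int × Int × Int × Int) :
    (pvLexLe a b || pvLexLe b a) = true := by
  obtain ⟨a1, a2, a3, a4⟩ := a; obtain ⟨b1, b2, b3, b4⟩ := b
  simp only [pvLexLe, Bool.or_eq_true, Bool.and_eq_true, decide_eq_true_eq]
  omega

theorem pvLexLe_antisymm (a b : Int × Int × Int × Int)
    (h1 : pvLexLe a b = true) (h2 : pvLexLe b a = true) : a = b := by
  obtain ⟨a1, a2, a3, a4⟩ := a; obtain ⟨b1, b2, b3, b4⟩ := b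
  simp only [pvLexLe, Bool.or_eq_true, Bool.and_eq_true, decide_eq_true_eq] at *
  simp only [Prod.mk.injEq]
  omega

theorem pvLexLe_item (a b : Int × Int × Int × Int) (h : pvLexLe a b = true) : a.1 ≤ b.1 := by
  obtain ⟨a1, a2, a3, a4⟩ := a; obtain ⟨b1, b2, b3, b4⟩ := b
  simp only [pvLexLe, Bool.or_eq_true, Bool.and_eq_true, decide_eq_true_eq] at h
  omega

theorem mergeSort_pairwise (l : List (Int × Int × Int × Int)) :
    (l.mergeSort pvLexLe).Pairwise (fun a b => pvLexLe a b = true) :=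
  List.pairwise_mergeSort pvLexLe_trans pvLexLe_total l

-- ---- filtering one item's records out of the sorted list = out of the raw list ----

theorem enumF_filter (sb x : Int) (px : (Int × Int × Int × Int) → Bool)
    (hpx : ∀ it j c, px (it, sb, j, c) = (it == x)) :
    ∀ (fd : List (Int × List Int)) (s : Int),
    (enumF sb fd s).filter px
      = (PySem.List.enumerate fd s).flatMap
          (fun jp => (jp.2.2.filter (fun it => it == x)).map (fun it => (it, sb, jp.1, jp.2.1))) := by
  intro fd
  induction fd with
  | nil => intro s; simp [enumF, PySem.List.enumerate]
  | cons p t ih =>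
      intro s
      simp only [enumF, PySem.List.enumerate_cons, List.flatMap_cons, List.filter_append] at *
      rw [ih]
      congr 1
      rw [List.filter_map]
      congr 1
      apply List.filter_congr
      intro a _
      exact hpx a s p.1

theorem enumF_filter_nil (sb : Int) (px : (Int × Int × Int × Int) → Bool)
    (hpx : ∀ it j c, px (it, sb, j, c) = false)
    (fd : List (Int × List Int)) (s : Int) :
    (enumF sb fd s).filter px = [] := by
  rw [List.filter_eq_nil_iff]
  intro r hr
  obtain ⟨h1, jp, _, h3, h4, _⟩ := mem_enumF hr
  obtain ⟨r1, r2, r3, r4⟩ := r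
  simp only at h1 h3 h4
  subst h1 h3 h4
  simp [hpx]

theorem pairwise_of_all_eq {α : Type} (R : α → α → Prop) (l : List α) (e : α)
    (h : ∀ a ∈ l, a = e) (hr : R e e) : l.Pairwise R := by
  induction l with
  | nil => exact List.Pairwise.nil
  | cons a t ih =>
      refine List.pairwise_cons.mpr ⟨?_, ih (fun b hb => h b (List.mem_cons_of_mem _ hb))⟩
      intro b hb
      rw [h a List.mem_cons_self, h b (List.mem_cons_of_mem _ hb)]
      exact hr

theorem enumF_filter_pairwise (sb x : Int) (px : (Int × Int × Int × Int) → Bool)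
    (hpx : ∀ it j c, px (it, sb, j, c) = (it == x))
    (fd : List (Int × List Int)) (s : Int) :
    ((enumF sb fd s).filter px).Pairwise (fun a b => pvLexLe a b = true) := by
  rw [enumF_filter sb x px hpx]
  rw [List.pairwise_flatMap]
  constructor
  · intro jp _
    refine pairwise_of_all_eq _ _ ((x, sb, jp.1, jp.2.1) : Int × Int × Int × Int) ?_ ?_
    · intro a ha
      obtain ⟨it, hit, rfl⟩ := List.mem_map.mp ha
      rw [beq_iff_eq.mp (List.mem_filter.mp hit).2]
    · simp [pvLexLe]
  · refine (PySem.List.pairwise_lt_enumerate fd s).imp ?_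
    intro jp1 jp2 hlt r1 h1 r2 h2
    simp only [List.mem_map, List.mem_filter] at h1 h2
    obtain ⟨it1, ⟨_, he1⟩, rfl⟩ := h1
    obtain ⟨it2, ⟨_, he2⟩, rfl⟩ := h2
    have e1 : it1 = x := beq_iff_eq.mp he1
    have e2 : it2 = x := beq_iff_eq.mp he2
    subst e1 e2
    simp [pvLexLe, hlt]

theorem filter_sorted_eq (records : List (Int × Int × Int × Int))
    (px : (Int × Int × Int × Int) → Bool)
    (hpw : (records.filter px).Pairwise (fun a b => pvLexLe a b = true)) :
    (records.mergeSort pvLexLe).filter px = records.filter px := by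
  refine List.Perm.eq_of_pairwise (le := fun a b => pvLexLe a b = true)
    (fun a b _ _ h1 h2 => pvLexLe_antisymm a b h1 h2) ?_ hpw ?_
  · exact List.Pairwise.sublist List.filter_sublist (mergeSort_pairwise records)
  · exact (List.mergeSort_perm records pvLexLe).filter px

-- ---- the lookup dict read = cid of the last matching record ----

theorem fold_insert_getD (x v : Int) (l : List Int) :
    ∀ (d : PySem.Dict Int Int),
    (l.foldl (fun d it => d.insert it v) d).getD x (-1)
      = if x ∈ l then v else d.getD x (-1) := by
  induction l with
  | nil => intro d; simp
  | cons a t ih =>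
      intro d
      rw [List.foldl_cons, ih]
      by_cases hax : a = x
      · subst hax
        simp [PySem.Dict.getD, PySem.Dict.get?_insert_self]
      · have : (d.insert a v).getD x (-1) = d.getD x (-1) := by
          simp [PySem.Dict.getD, PySem.Dict.get?_insert_of_ne _ _ (fun h => hax h.symm)]
        rw [this]
        by_cases hm : x ∈ t
        · simp [hm, List.mem_cons]
        · have hxa : ¬(x = a) := fun h => hax h.symm
          simp [hm, hxa, List.mem_cons]

theorem map_const_lastD (l : List Int) (c : Int) : ∀ (w : Int),
    ((l.map (fun _ => c)).getLast?).getD w = if l = [] then w else c := by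
  induction l with
  | nil => intro w; rfl
  | cons a t ih =>
      intro w
      rw [List.map_cons, lastD_cons, ih c]
      by_cases h : t = [] <;> simp [h]

theorem lookup_getD (x sb : Int) (px : (Int × Int × Int × Int) → Bool)
    (hpx : ∀ it j c, px (it, sb, j, c) = (it == x)) :
    ∀ (fd : List (Int × List Int)) (d : PySem.Dict Int Int) (s : Int),
    (pvLookup fd d).getD x (-1)
      = (((enumF sb fd s).filter px).map pvCid).getLast?.getD (d.getD x (-1)) := by
  intro fd
  induction fd with
  | nil => intro d s; simp [pvLookup, enumF, PySem.List.enumerate]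
  | cons p t ih =>
      intro d s
      simp only [pvLookup, List.foldl_cons] at *
      rw [ih (p.2.foldl (fun d it => d.insert it p.1) d) (s + 1)]
      simp only [enumF, PySem.List.enumerate_cons, List.flatMap_cons, List.filter_append,
        List.map_append]
      rw [lastD_append]
      congr 1
      rw [fold_insert_getD]
      rw [List.filter_map]
      have hfc : ∀ a ∈ p.2, (px ∘ fun it : Int => (it, sb, s, p.1)) a = ((fun it : Int => it == x) a) :=
        fun a _ => hpx a s p.1
      rw [List.filter_congr hfc]
      rw [List.map_map]
      have hmk : pvCid ∘ (fun it : Int => (it, sb, s, p.1)) = fun _ => p.1 := rfl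
      rw [hmk, map_const_lastD]
      by_cases hm : x ∈ p.2
      · have hne : ¬ (p.2.filter (fun it => it == x) = []) := by
          intro hcon
          exact (List.filter_eq_nil_iff.mp hcon x hm) (by simp)
        simp [hm, hne]
      · have hnil : p.2.filter (fun it => it == x) = [] := by
          rw [List.filter_eq_nil_iff]; intro a ha hax'; exact hm (beq_iff_eq.mp hax' ▸ ha)
        simp [hm, hnil]

-- ---- the universe ----

theorem universe_eq (gt pred : List (Int × List Int)) :
    pvUniverse gt pred
      = pvDI ((pvRecords gt pred).mergeSort pvLexLe) := by
  have hstep : pvUniverse gt pred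
      = PySem.List.sorted
          (PySem.Set.ofList ((gt.map Prod.snd).flatten ++ (pred.map Prod.snd).flatten))
          (fun x => x) false := by
    by_cases h : gt = [] ∧ pred = []
    · obtain ⟨rfl, rfl⟩ := h
      rfl
    · rw [pvUniverse, if_neg h]
  rw [hstep]
  have hitem : ((pvRecords gt pred).mergeSort pvLexLe).Pairwise (fun a b => a.1 ≤ b.1) :=
    (mergeSort_pairwise (pvRecords gt pred)).imp (fun h => pvLexLe_item _ _ h)
  have hlt := pvDI_pairwise _ hitem
  refine PySem.List.sorted_eq_of_perm_of_pairwise_lt _ _ _ ?_ hlt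
  refine (List.perm_ext_iff_of_nodup (hlt.imp (fun h => ne_of_lt h)) (PySem.Set.nodup_ofList _)).mpr ?_
  intro x
  rw [PySem.Set.mem_ofList, ← records_map_item gt pred]
  constructor
  · intro hx
    obtain ⟨s, hs, rfl⟩ := pvDI_subset _ x hx
    exact List.mem_map_of_mem ((List.mergeSort_perm (pvRecords gt pred) pvLexLe).mem_iff.mp hs)
  · intro hx
    obtain ⟨s, hs, rfl⟩ := List.mem_map.mp hx
    exact pvDI_mem _ s ((List.mergeSort_perm (pvRecords gt pred) pvLexLe).mem_iff.mpr hs)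

theorem labels_main (gt pred : List (Int × List Int)) :
    labels_for_items_py gt pred = labels_for_items_py_alt gt pred := by
  have hitem : ((pvRecords gt pred).mergeSort pvLexLe).Pairwise (fun a b => a.1 ≤ b.1) :=
    (mergeSort_pairwise (pvRecords gt pred)).imp (fun h => pvLexLe_item _ _ h)
  unfold labels_for_items_py labels_for_items_py_alt
  rw [pvSweep_spec ((pvRecords gt pred).mergeSort pvLexLe).length _ le_rfl hitem]
  rw [← universe_eq]
  have hpred0 : ∀ (x : Int), (enumF 1 pred (gt.length : Int)).filter (gKey x) = [] := by
    intro x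
    exact enumF_filter_nil 1 (gKey x) (fun it j c => by simp [gKey]) pred _
  have hgt0 : ∀ (x : Int), (enumF 0 gt 0).filter (pKey x) = [] := by
    intro x
    exact enumF_filter_nil 0 (pKey x) (fun it j c => by simp [pKey]) gt _
  have hgkey : ∀ (x : Int), ∀ (it j c : Int), gKey x (it, 0, j, c) = (it == x) := by
    intro x it j c; simp [gKey]
  have hpkey : ∀ (x : Int), ∀ (it j c : Int), pKey x (it, 1, j, c) = (it == x) := by
    intro x it j c; simp [pKey]
  refine Prod.ext ?_ ?_ <;> simp only
  · refine List.map_congr_left (fun x _ => ?_)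
    have hfilt : (pvRecords gt pred).filter (gKey x) = (enumF 0 gt 0).filter (gKey x) := by
      rw [pvRecords_eq, List.filter_append, hpred0 x, List.append_nil]
    have hpw : ((pvRecords gt pred).filter (gKey x)).Pairwise (fun a b => pvLexLe a b = true) := by
      rw [hfilt]
      exact enumF_filter_pairwise 0 x (gKey x) (hgkey x) gt 0
    unfold lastLab
    rw [filter_sorted_eq _ _ hpw, hfilt]
    rw [lookup_getD x 0 (gKey x) (hgkey x) gt PySem.Dict.empty 0]
    rfl
  · refine List.map_congr_left (fun x _ => ?_)
    have hfilt : (pvRecords gt pred).filter (pKey x)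
        = (enumF 1 pred (gt.length : Int)).filter (pKey x) := by
      rw [pvRecords_eq, List.filter_append, hgt0 x, List.nil_append]
    have hpw : ((pvRecords gt pred).filter (pKey x)).Pairwise (fun a b => pvLexLe a b = true) := by
      rw [hfilt]
      exact enumF_filter_pairwise 1 x (pKey x) (hpkey x) pred _
    unfold lastLab
    rw [filter_sorted_eq _ _ hpw, hfilt]
    rw [lookup_getD x 1 (pKey x) (hpkey x) pred PySem.Dict.empty (gt.length : Int)]
    rfl

-- ===== VERDICT (by name: the statement is the Claim_ definition above) =====
theorem labels_for_items_py_spec : Claim_equal_labels_for_items_py := by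
  intro gt pred _
  unfold Spec_labels_for_items_py
  exact labels_main gt pred
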